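-- pv_equiv track=rewrite | github.com/SehwanHong/WebSearchEngine | merge.py | getcurrentkey
-- ===== SOURCE A (Python) =====
-- def getcurrentkey(linelist:list, filelength) -> set:
--     keys = set()
--     for i in range(filelength):
--         if bool(linelist[i]):
--             keys.add(list(linelist[i].keys())[0])
--     if bool(keys):
--         return sorted(keys)[0]
--     else:
--         return None
-- ===== SOURCE B (Python) =====
-- def getcurrentkey(linelist: list, filelength) -> set:
--     best = None
--     i = filelength - 1
--     while i >= 0:
--         d = linelist[i]
--         if d:
--             k = next(iter(d))
--             if best is None or k < best:
--                 best = k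
--         i -= 1
--     return best
-- ===== Notes on version B (the rewrite author's own statement) =====
-- stated objective: simpler
-- what changed: Replaces the build-a-set-then-sort approach by a backward while-loop over the indices keeping a running minimum of the first keys, so the intermediate set and the sort disappear.
import Mathlib
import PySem

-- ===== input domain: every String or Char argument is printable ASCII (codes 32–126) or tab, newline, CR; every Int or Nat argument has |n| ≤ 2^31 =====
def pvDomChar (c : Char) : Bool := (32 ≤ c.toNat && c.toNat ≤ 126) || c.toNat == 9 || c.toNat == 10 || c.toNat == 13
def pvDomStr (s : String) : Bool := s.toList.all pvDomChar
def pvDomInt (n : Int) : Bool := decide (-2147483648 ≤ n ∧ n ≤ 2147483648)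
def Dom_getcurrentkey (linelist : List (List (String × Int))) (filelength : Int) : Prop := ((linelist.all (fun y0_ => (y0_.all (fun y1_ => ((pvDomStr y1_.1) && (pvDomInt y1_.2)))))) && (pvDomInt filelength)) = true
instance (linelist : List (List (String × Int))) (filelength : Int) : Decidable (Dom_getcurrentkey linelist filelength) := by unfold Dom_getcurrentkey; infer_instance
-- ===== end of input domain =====

-- B replaces A's build-a-set-then-sort with a backward while-loop keeping a running minimum; same return value.

-- ===== PORT A =====
-- literal port of A: collect the first key of each non-empty dict into a set, then sorted(keys)[0].
-- pyGetD with default [] stands for linelist[i]; it is exact under Pre_ (every index is in range there).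
def getcurrentkey (linelist : List (List (String × Int))) (filelength : Int) : Option String :=
  let keys : PySem.Set String :=
    (PySem.List.pyRange 0 filelength 1).foldl
      (fun keys i =>
        match PySem.List.pyGetD linelist i [] with
        | [] => keys
        | (k, _) :: _ => PySem.Set.add keys k)
      PySem.Set.empty
  match PySem.List.sorted keys (fun x => x) false with
  | [] => none
  | m :: _ => some m

-- ===== PORT B =====
-- literal port of B: the while-loop 'i = filelength-1; while i >= 0: … ; i -= 1' as a
-- recursive function on the counter i, carrying the running minimum `best`.
def pvGoB (linelist : List (List (String × Int))) (best : Option String) (i : Int) : Option String :=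
  if h : 0 ≤ i then
    let best' :=
      match PySem.List.pyGetD linelist i [] with
      | [] => best
      | (k, _) :: _ =>
        match best with
        | none => some k
        | some b => if k < b then some k else some b
    pvGoB linelist best' (i - 1)
  else best
termination_by (i + 1).toNat
decreasing_by omega

def getcurrentkey_alt (linelist : List (List (String × Int))) (filelength : Int) : Option String :=
  pvGoB linelist none (filelength - 1)

-- ===== PRECONDITION & SPEC =====
-- Pre_ excludes exactly the inputs where linelist[i] raises IndexError (filelength beyond the list length).
def Pre_getcurrentkey (linelist : List (List (String × Int))) (filelength : Int) : Prop :=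
  filelength ≤ (linelist.length : Int)
instance (linelist : List (List (String × Int))) (filelength : Int) : Decidable (Pre_getcurrentkey linelist filelength) := by unfold Pre_getcurrentkey; infer_instance

def pvWitness_getcurrentkey : (List (List (String × Int))) × Int := ([[("b", 1)], [], [("a", 2), ("z", 3)]], 3)

def Spec_getcurrentkey (linelist : List (List (String × Int))) (filelength : Int) (out : Option String) : Prop := out = getcurrentkey_alt linelist filelength
instance (linelist : List (List (String × Int))) (filelength : Int) (out : Option String) : Decidable (Spec_getcurrentkey linelist filelength out) := by unfold Spec_getcurrentkey; infer_instance

-- ===== CLAIM (what is proved, stated in full; the proofs are below) =====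
def Claim_equal_getcurrentkey : Prop := ∀ (linelist : List (List (String × Int))) (filelength : Int), Dom_getcurrentkey linelist filelength → Pre_getcurrentkey linelist filelength → Spec_getcurrentkey linelist filelength (getcurrentkey linelist filelength)

-- ===== LEMMAS AND PROOFS =====

-- the keys contributed by the scanned indices, flattened into one list
def pvKeysOf (linelist : List (List (String × Int))) (r : List Int) : List String :=
  r.flatMap (fun i =>
    match PySem.List.pyGetD linelist i [] with
    | [] => []
    | (k, _) :: _ => [k])

-- option-lifted minimum of two candidates
def pvM (x y : Option String) : Option String :=
  match x, y with
  | none, y => y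
  | some a, none => some a
  | some a, some b => some (min a b)

-- the running-min step of B, as a binary operation on the accumulator
def pvStep (b : Option String) (k : String) : Option String :=
  match b with
  | none => some k
  | some b => if k < b then some k else some b

lemma pvStep_eq_M (b : Option String) (k : String) : pvStep b k = pvM b (some k) := by
  cases b with
  | none => rfl
  | some x =>
    simp only [pvStep, pvM]
    by_cases h : k < x
    · simp [h, min_eq_right h.le]
    · simp [h, min_eq_left (not_lt.mp h)]

lemma pvM_assoc (x y z : Option String) : pvM (pvM x y) z = pvM x (pvM y z) := by
  cases x <;> cases y <;> cases z <;> simp [pvM, min_assoc]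

lemma pvM_none_right (x : Option String) : pvM x none = x := by cases x <;> rfl


lemma foldl_pvStep_eq (l : List String) (b : Option String) :
    l.foldl pvStep b = pvM b l.min? := by
  induction l generalizing b with
  | nil => simp [pvM_none_right]
  | cons k t ih =>
    rw [List.foldl_cons, ih, pvStep_eq_M, pvM_assoc]
    congr 1
    cases h : t.min? with
    | none =>
      have : t = [] := List.min?_eq_none_iff.mp h
      subst this; rfl
    | some m =>
      rw [List.min?_cons, h]
      rfl

lemma pvKeysOf_cons (linelist : List (List (String × Int))) (i : Int) (r : List Int) :
    pvKeysOf linelist (i :: r)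
      = (match PySem.List.pyGetD linelist i [] with
         | [] => []
         | (k, _) :: _ => [k]) ++ pvKeysOf linelist r := by
  simp [pvKeysOf]

lemma min?_set_add (s : List String) (k : String) :
    (PySem.Set.add s k).min? = pvStep s.min? k := by
  cases hmin : s.min? with
  | none =>
    have hs : s = [] := List.min?_eq_none_iff.mp hmin
    subst hs
    simp [PySem.Set.add, PySem.Set.contains, pvStep]
  | some m =>
    obtain ⟨hmem, hle⟩ := List.min?_eq_some_iff_subtype.mp hmin
    by_cases hc : k ∈ s
    · have hadd : PySem.Set.add s k = s := by
        simp [PySem.Set.add, PySem.Set.contains, hc]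
      have hmk : ¬ k < m := not_lt.mpr (hle k hc)
      rw [hadd, hmin]
      simp [pvStep, hmk]
    · have hadd : PySem.Set.add s k = s ++ [k] := by
        simp [PySem.Set.add, PySem.Set.contains, hc]
      rw [hadd]
      by_cases hkm : k < m
      · simp only [pvStep, if_pos hkm]
        apply List.min?_eq_some_iff_subtype.mpr
        refine ⟨by simp, ?_⟩
        intro b hb
        rcases List.mem_append.mp hb with hb | hb
        · exact le_trans hkm.le (hle b hb)
        · simp at hb; simp [hb]
      · simp only [pvStep, if_neg hkm]
        apply List.min?_eq_some_iff_subtype.mpr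
        refine ⟨List.mem_append.mpr (Or.inl hmem), ?_⟩
        intro b hb
        rcases List.mem_append.mp hb with hb | hb
        · exact hle b hb
        · simp at hb; subst hb; exact not_lt.mp hkm

lemma foldl_add_min? (l : List String) (s : List String) :
    (l.foldl PySem.Set.add s).min? = l.foldl pvStep s.min? := by
  induction l generalizing s with
  | nil => rfl
  | cons k t ih => simp only [List.foldl_cons, ih, min?_set_add]

lemma sorted_head?_eq_min? (s : List String) :
    (PySem.List.sorted s (fun x => x) false).head? = s.min? := by
  cases h : PySem.List.sorted s (fun x => x) false with
  | nil =>
    have hp := PySem.List.sorted_perm (xs := s) (key := fun x => x) (rev := false)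
    rw [h] at hp
    rw [List.nil_perm.mp hp]
    rfl
  | cons m t =>
    have hp := PySem.List.sorted_perm (xs := s) (key := fun x => x) (rev := false)
    rw [h] at hp
    have hmem : m ∈ s := hp.mem_iff.mp (by simp)
    have hle := PySem.List.key_head_sorted_le (xs := s) (key := fun x => x) h
    simp only [List.head?_cons]
    exact (List.min?_eq_some_iff_subtype.mpr ⟨hmem, fun b hb => hle b hb⟩).symm

lemma foldA_eq (linelist : List (List (String × Int))) (r : List Int) (acc : PySem.Set String) :
    (r.foldl
      (fun keys i =>
        match PySem.List.pyGetD linelist i [] with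
        | [] => keys
        | (k, _) :: _ => PySem.Set.add keys k)
      acc)
    = (pvKeysOf linelist r).foldl PySem.Set.add acc := by
  induction r generalizing acc with
  | nil => rfl
  | cons i t ih =>
    rw [List.foldl_cons, pvKeysOf_cons, List.foldl_append, ih]
    cases PySem.List.pyGetD linelist i [] with
    | nil => rfl
    | cons p _ => cases p; rfl

lemma match_eq_head? (l : List String) :
    (match l with | [] => (none : Option String) | m :: _ => some m) = l.head? := by
  cases l <;> rfl

-- min? distributes over append through pvM
lemma min?_append (l1 l2 : List String) : (l1 ++ l2).min? = pvM l1.min? l2.min? := by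
  induction l1 with
  | nil => simp [pvM]
  | cons a t ih =>
    rw [List.cons_append, List.min?_cons, List.min?_cons, ih]
    cases h1 : t.min? <;> cases h2 : l2.min? <;> simp [pvM, min_assoc]

-- B's loop from counter (j : Nat) computes the pvM of best with the min over indices 0..j
lemma pvGoB_eq (linelist : List (List (String × Int))) (j : Nat) (best : Option String) :
    pvGoB linelist best (j : Int)
      = pvM best ((pvKeysOf linelist (PySem.List.pyRange 0 ((j : Int) + 1) 1)).min?) := by
  induction j generalizing best with
  | zero =>
    rw [pvGoB, dif_pos (by norm_num : (0:Int) ≤ ((0:Nat):Int)), pvGoB,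
        dif_neg (by norm_num : ¬ (0:Int) ≤ ((0:Nat):Int) - 1)]
    simp only [Nat.cast_zero]
    have hr : PySem.List.pyRange 0 ((0:Int) + 1) 1 = [(0:Int)] := by
      simpa using PySem.List.pyRange_one_singleton (a := (0:Int))
    rw [hr]
    cases h : PySem.List.pyGetD linelist (0:Int) [] with
    | nil => simp [pvKeysOf, h, pvM_none_right]
    | cons p t =>
      cases p with
      | mk k v =>
        have hk : pvKeysOf linelist [(0:Int)] = [k] := by simp [pvKeysOf, h]
        rw [hk]
        have hL : (match (k, v) :: t with
            | [] => best
            | (k, _) :: _ =>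
              match best with
              | none => some k
              | some b => if k < b then some k else some b) = pvStep best k := by
          cases best <;> rfl
        rw [hL, pvStep_eq_M]
        rfl
  | succ n ih =>
    rw [pvGoB]
    have h0 : (0 : Int) ≤ (n : Int) + 1 := by positivity
    simp only [Nat.cast_add, Nat.cast_one, dif_pos h0]
    have hsub : ((n : Int) + 1) - 1 = (n : Int) := by ring
    rw [hsub, ih]
    have hsplit : PySem.List.pyRange 0 ((n : Int) + 1 + 1) 1
        = PySem.List.pyRange 0 ((n : Int) + 1) 1 ++ [(n : Int) + 1] := by
      exact PySem.List.pyRange_one_succ_right (by positivity)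
    rw [hsplit]
    have hkeys : pvKeysOf linelist (PySem.List.pyRange 0 ((n : Int) + 1) 1 ++ [(n : Int) + 1])
        = pvKeysOf linelist (PySem.List.pyRange 0 ((n : Int) + 1) 1)
          ++ pvKeysOf linelist [(n : Int) + 1] := by
      simp [pvKeysOf]
    rw [hkeys, min?_append]
    cases h : PySem.List.pyGetD linelist ((n : Int) + 1) [] with
    | nil =>
      simp [pvKeysOf, h, pvM_none_right]
    | cons p t =>
      cases p with
      | mk k v =>
        have hk : pvKeysOf linelist [(n : Int) + 1] = [k] := by simp [pvKeysOf, h]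
        rw [hk]
        have hL : (match (k, v) :: t with
            | [] => best
            | (k, _) :: _ =>
              match best with
              | none => some k
              | some b => if k < b then some k else some b) = pvStep best k := by
          cases best <;> rfl
        rw [hL, pvStep_eq_M]
        cases best <;> cases hK : (pvKeysOf linelist (PySem.List.pyRange 0 ((n : Int) + 1) 1)).min? <;>
          simp [pvM, min_comm, min_left_comm]

-- ===== VERDICT (by name: the statement is the Claim_ definition above) =====
theorem getcurrentkey_spec : Claim_equal_getcurrentkey := by
  intro linelist filelength _ _
  unfold Spec_getcurrentkey getcurrentkey getcurrentkey_alt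
  rw [match_eq_head?, sorted_head?_eq_min?, foldA_eq, foldl_add_min?, foldl_pvStep_eq]
  by_cases hpos : 0 < filelength
  · obtain ⟨j, hj⟩ : ∃ j : Nat, filelength - 1 = (j : Int) :=
      ⟨(filelength - 1).toNat, by omega⟩
    rw [hj, pvGoB_eq]
    have : (j : Int) + 1 = filelength := by omega
    rw [this]
    cases h : (pvKeysOf linelist (PySem.List.pyRange 0 filelength 1)).min? <;> rfl
  · have h1 : PySem.List.pyRange 0 filelength 1 = [] :=
      PySem.List.pyRange_one_eq_nil (by omega)
    rw [h1]
    rw [pvGoB]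
    simp only [dif_neg (by omega : ¬ (0:Int) ≤ filelength - 1)]
    rfl
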